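-- pv_equiv track=rewrite | github.com/cutehammond772/problem-solving-archive | 백준/Silver/31263. 대한민국을 지키는 가장 긴 힘/대한민국을 지키는 가장 긴 힘.py | solve
-- ===== SOURCE A (Python) =====
-- def valid(*digits):
-- 	number = 0
--
-- 	for i in range(len(digits)):
-- 		if i == 0 and digits[i] == 0:
-- 			return False
--
-- 		number = number * 10 + digits[i]
--
-- 	return 1 <= number <= 641
--
-- def solve(N, A):
-- 	memo = [N] * (N + 1)
-- 	memo[0] = 0
--
-- 	for x in range(1, N + 1):
-- 		if valid(A[x]):
-- 			memo[x] = min(memo[x], memo[x - 1] + 1)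
--
-- 		if x > 1 and valid(A[x - 1], A[x]):
-- 			memo[x] = min(memo[x], memo[x - 2] + 1)
--
-- 		if x > 2 and valid(A[x - 2], A[x - 1], A[x]):
-- 			memo[x] = min(memo[x], memo[x - 3] + 1)
--
-- 	return memo[N]
-- ===== SOURCE B (Python) =====
-- def valid(*digits):
-- 	number = 0
--
-- 	for i in range(len(digits)):
-- 		if i == 0 and digits[i] == 0:
-- 			return False
--
-- 		number = number * 10 + digits[i]
--
-- 	return 1 <= number <= 641
--
-- def solve(N, A):
-- 	from functools import lru_cache
--
-- 	@lru_cache(maxsize=None)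
-- 	def f(x):
-- 		# minimum segments covering digits A[1..x]; None if unpartitionable
-- 		if x == 0:
-- 			return 0
-- 		best = None
-- 		if valid(A[x]):
-- 			p = f(x - 1)
-- 			if p is not None:
-- 				best = p + 1
-- 		if x > 1 and valid(A[x - 1], A[x]):
-- 			p = f(x - 2)
-- 			if p is not None and (best is None or p + 1 < best):
-- 				best = p + 1
-- 		if x > 2 and valid(A[x - 2], A[x - 1], A[x]):
-- 			p = f(x - 3)
-- 			if p is not None and (best is None or p + 1 < best):
-- 				best = p + 1
-- 		return best
--
-- 	for x in range(N + 1):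
-- 		f(x)
-- 	r = f(N)
-- 	return N if r is None else r
-- ===== Notes on version B (the rewrite author's own statement) =====
-- stated objective: alternative
-- what changed: Replaces A's bottom-up table seeded with the sentinel N by a top-down memoized recursion f(x) returning None for unreachable states, with N substituted only at the end; the sentinel arithmetic (min against N, N+1 candidates) disappears.
import Mathlib
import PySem

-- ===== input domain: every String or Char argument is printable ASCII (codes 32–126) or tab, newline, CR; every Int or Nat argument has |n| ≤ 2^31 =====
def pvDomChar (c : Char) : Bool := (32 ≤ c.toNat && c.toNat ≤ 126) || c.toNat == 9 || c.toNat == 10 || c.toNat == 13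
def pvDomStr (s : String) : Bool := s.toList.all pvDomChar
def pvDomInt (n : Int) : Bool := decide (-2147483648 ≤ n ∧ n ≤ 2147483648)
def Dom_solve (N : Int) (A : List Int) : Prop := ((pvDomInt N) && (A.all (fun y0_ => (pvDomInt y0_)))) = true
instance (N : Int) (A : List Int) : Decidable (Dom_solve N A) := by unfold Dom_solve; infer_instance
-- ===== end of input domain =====

-- B replaces A's sentinel-seeded bottom-up table by a top-down memoized recursion that
-- returns "none" for unreachable prefixes and substitutes N only at the very end (objective: alternative).

-- ===== PORT A =====
-- shared module-level helper valid(*digits) (used verbatim by both A and B)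
def validGo : List Int → Nat → Int → Bool
  | [], _, number => decide (1 ≤ number ∧ number ≤ 641)
  | d :: rest, i, number =>
    if i = 0 ∧ d = 0 then false else validGo rest (i + 1) (number * 10 + d)

def valid (digits : List Int) : Bool := validGo digits 0 0

-- one iteration x of A's loop over the memo table
def solveStep (A : List Int) (memo : List Int) (x : Int) : List Int :=
  let m1 := if valid [PySem.List.pyGetD A x 0] = true then
      memo.set x.toNat (min (memo.getD x.toNat 0) (memo.getD (x - 1).toNat 0 + 1)) else memo
  let m2 := if x > 1 ∧ valid [PySem.List.pyGetD A (x - 1) 0, PySem.List.pyGetD A x 0] = true then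
      m1.set x.toNat (min (m1.getD x.toNat 0) (m1.getD (x - 2).toNat 0 + 1)) else m1
  let m3 := if x > 2 ∧ valid [PySem.List.pyGetD A (x - 2) 0, PySem.List.pyGetD A (x - 1) 0,
      PySem.List.pyGetD A x 0] = true then
      m2.set x.toNat (min (m2.getD x.toNat 0) (m2.getD (x - 3).toNat 0 + 1)) else m2
  m3

def solve (N : Int) (A : List Int) : Int :=
  let memo := (List.replicate (N + 1).toNat N).set 0 0
  ((PySem.List.pyRange 1 (N + 1) 1).foldl (solveStep A) memo).getD N.toNat 0

-- ===== PORT B =====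
-- Source B's "if p is not None and (best is None or p + 1 < best): best = p + 1"
def relax (best : Option Int) (p : Option Int) : Option Int :=
  match p with
  | none => best
  | some p =>
    match best with
    | none => some (p + 1)
    | some b => if p + 1 < b then some (p + 1) else some b

-- Source B's memoized f(x): minimum segments covering A[1..x], none if unpartitionable
def fB (A : List Int) : Nat → Option Int
  | 0 => some 0
  | n + 1 =>
    let best : Option Int := none
    let best := if valid [A.getD (n + 1) 0] = true then relax best (fB A n) else best
    let best := if 1 ≤ n ∧ valid [A.getD n 0, A.getD (n + 1) 0] = true then
        relax best (fB A (n - 1)) else best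
    let best := if 2 ≤ n ∧ valid [A.getD (n - 1) 0, A.getD n 0, A.getD (n + 1) 0] = true then
        relax best (fB A (n - 2)) else best
    best
  decreasing_by all_goals omega

def solve_alt (N : Int) (A : List Int) : Int :=
  match fB A N.toNat with
  | none => N
  | some v => v

-- ===== PRECONDITION & SPEC =====
-- Pre_ excludes exactly the inputs where A raises: N < 0 (memo[0] = 0 on an empty table is an
-- IndexError) and 0 < N with len(A) ≤ N (A[x] is an IndexError for some x in 1..N).
def Pre_solve (N : Int) (A : List Int) : Prop := 0 ≤ N ∧ (0 < N → N < (A.length : Int))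
instance (N : Int) (A : List Int) : Decidable (Pre_solve N A) := by unfold Pre_solve; infer_instance

def pvWitness_solve : Int × List Int := (2, [0, 6, 4])

def Spec_solve (N : Int) (A : List Int) (out : Int) : Prop := out = solve_alt N A
instance (N : Int) (A : List Int) (out : Int) : Decidable (Spec_solve N A out) := by unfold Spec_solve; infer_instance

-- ===== CLAIM (what is proved, stated in full; the proofs are below) =====
def Claim_equal_solve : Prop := ∀ (N : Int) (A : List Int), Dom_solve N A → Pre_solve N A → Spec_solve N A (solve N A)

-- ===== LEMMAS AND PROOFS =====

-- A's memo entry = B's f capped at the sentinel N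
def capOpt (Nn : Int) (o : Option Int) : Int :=
  match o with
  | none => Nn
  | some v => min v Nn

lemma cap_relax (Nn : Int) (o p : Option Int) :
    min (capOpt Nn o) (capOpt Nn p + 1) = capOpt Nn (relax o p) := by
  cases p with
  | none => cases o <;> simp only [capOpt, relax] <;> omega
  | some u =>
    cases o with
    | none => simp only [capOpt, relax]; omega
    | some b =>
      simp only [capOpt, relax]
      split_ifs with h
      · show _ = min (u + 1) Nn
        omega
      · show _ = min b Nn
        omega

lemma relax_cases {b p : Option Int} {w : Int} (h : relax b p = some w) :
    b = some w ∨ ∃ u, p = some u ∧ w = u + 1 := by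
  cases p with
  | none => exact Or.inl h
  | some u =>
    cases b with
    | none => simp only [relax, Option.some.injEq] at h; exact Or.inr ⟨u, rfl, h.symm⟩
    | some bb =>
      simp only [relax] at h
      split_ifs at h <;> simp only [Option.some.injEq] at h
      · exact Or.inr ⟨u, rfl, h.symm⟩
      · exact Or.inl (by rw [h])

lemma fB_le (A : List Int) : ∀ (n : Nat) (v : Int), fB A n = some v → v ≤ (n : Int) := by
  intro n
  induction n using Nat.strong_induction_on with
  | _ n ih =>
    intro v hv
    match n with
    | 0 =>
      rw [fB] at hv
      simp only [Option.some.injEq] at hv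
      omega
    | m + 1 =>
      rw [fB] at hv
      have step : ∀ (b : Option Int) (j : Nat), j < m + 1 →
          (∀ w : Int, b = some w → ∃ j' u, j' < m + 1 ∧ fB A j' = some u ∧ w = u + 1) →
          ∀ (c : Prop) (inst : Decidable c) (w : Int),
            (@ite _ c inst (relax b (fB A j)) b) = some w →
            ∃ j' u, j' < m + 1 ∧ fB A j' = some u ∧ w = u + 1 := by
        intro b j hj hb c inst w hw
        split_ifs at hw
        · rcases relax_cases hw with h | ⟨u, hu, rfl⟩
          · exact hb _ h
          · exact ⟨j, u, hj, hu, rfl⟩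
        · exact hb _ hw
      have h0 : ∀ w : Int, (none : Option Int) = some w →
          ∃ j' u, j' < m + 1 ∧ fB A j' = some u ∧ w = u + 1 := by
        intro w h; cases h
      have P1 := step none m (by omega) h0 (valid [A.getD (m + 1) 0] = true) inferInstance
      have P2 := step _ (m - 1) (by omega) P1
        (1 ≤ m ∧ valid [A.getD m 0, A.getD (m + 1) 0] = true) inferInstance
      have P3 := step _ (m - 2) (by omega) P2
        (2 ≤ m ∧ valid [A.getD (m - 1) 0, A.getD m 0, A.getD (m + 1) 0] = true) inferInstance
      obtain ⟨j, u, hj, hu, rfl⟩ := P3 v hv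
      have := ih j hj u hu
      push_cast at *
      omega

lemma getD_set_self' (L : List Int) (t : Nat) (v : Int) (h : t < L.length) :
    (L.set t v).getD t 0 = v := by
  rw [List.getD_eq_getElem _ _ (by simpa using h)]; simp

lemma getD_set_ne' (L : List Int) (t i : Nat) (v : Int) (h : i ≠ t) :
    (L.set t v).getD i 0 = L.getD i 0 := by
  by_cases hi : i < L.length
  · rw [List.getD_eq_getElem _ _ (by simpa using hi), List.getD_eq_getElem _ _ hi,
      List.getElem_set_ne (by omega)]
  · rw [List.getD_eq_default _ _ (by simp; omega), List.getD_eq_default _ _ (by omega)]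

-- one conditional "memo[x] = min(memo[x], memo[pred] + 1)" stage of A, tracked against one
-- conditional relax stage of B
lemma stage (Nn : Int) (M : List Int) (t : Nat) (ht : t < M.length)
    (b p : Option Int) (c c' : Prop) (inst : Decidable c) (inst' : Decidable c')
    (hcc : c ↔ c') (hbt : M.getD t 0 = capOpt Nn b) :
    (@ite _ c inst (M.set t (min (M.getD t 0) (capOpt Nn p + 1))) M).length = M.length ∧
    (@ite _ c inst (M.set t (min (M.getD t 0) (capOpt Nn p + 1))) M).getD t 0
        = capOpt Nn (@ite _ c' inst' (relax b p) b) ∧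
    ∀ i, i ≠ t →
      (@ite _ c inst (M.set t (min (M.getD t 0) (capOpt Nn p + 1))) M).getD i 0 = M.getD i 0 := by
  by_cases hc : c
  · rw [if_pos hc, if_pos (hcc.mp hc)]
    refine ⟨by simp, ?_, fun i hi => getD_set_ne' M t i _ hi⟩
    rw [getD_set_self' M t _ ht, hbt]
    exact cap_relax Nn b p
  · rw [if_neg hc, if_neg (fun h => hc (hcc.mpr h))]
    exact ⟨rfl, hbt, fun _ _ => rfl⟩

lemma memo_inv (N : Int) (A : List Int) (hN : 0 ≤ N) (k : Nat) (hk : (k : Int) ≤ N) :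
    ((PySem.List.pyRange 1 ((k : Int) + 1) 1).foldl (solveStep A)
        ((List.replicate (N + 1).toNat N).set 0 0)).length = (N + 1).toNat ∧
    ∀ i : Nat, i < (N + 1).toNat →
      ((PySem.List.pyRange 1 ((k : Int) + 1) 1).foldl (solveStep A)
        ((List.replicate (N + 1).toNat N).set 0 0)).getD i 0 =
      if i ≤ k then capOpt N (fB A i) else N := by
  induction k with
  | zero =>
    rw [show ((0 : Nat) : Int) + 1 = 1 by norm_num, PySem.List.pyRange_one_eq_nil (le_refl 1),
      List.foldl_nil]
    constructor
    · simp
    · intro i hi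
      by_cases h0 : i = 0
      · subst h0
        rw [if_pos (le_refl 0), getD_set_self' _ _ _ (by simpa using hi), fB]
        simp only [capOpt]
        omega
      · rw [if_neg (by omega), getD_set_ne' _ _ _ _ h0,
          List.getD_replicate _ (by simpa using hi)]
  | succ k ih =>
    obtain ⟨ihlen, ihent⟩ := ih (by push_cast at *; omega)
    rw [show ((k + 1 : Nat) : Int) + 1 = ((k : Int) + 1) + 1 by push_cast; ring,
      PySem.List.pyRange_one_succ_right (by omega), List.foldl_append, List.foldl_cons,
      List.foldl_nil]
    generalize hM : (PySem.List.pyRange 1 ((k : Int) + 1) 1).foldl (solveStep A)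
        ((List.replicate (N + 1).toNat N).set 0 0) = M0 at ihlen ihent ⊢
    have ht : k + 1 < M0.length := by rw [ihlen]; omega
    -- digit reads line up between the two ports
    have hd1 : PySem.List.pyGetD A ((k : Int) + 1) 0 = A.getD (k + 1) 0 := by
      rw [show ((k : Int) + 1) = ((k + 1 : Nat) : Int) by push_cast; ring,
        PySem.List.pyGetD_natCast]
    have hd2 : PySem.List.pyGetD A ((k : Int) + 1 - 1) 0 = A.getD k 0 := by
      rw [show ((k : Int) + 1 - 1) = ((k : Nat) : Int) by ring, PySem.List.pyGetD_natCast]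
    have hc1 : (valid [PySem.List.pyGetD A ((k : Int) + 1) 0] = true) ↔
        (valid [A.getD (k + 1) 0] = true) := by rw [hd1]
    have hc2 : ((k : Int) + 1 > 1 ∧ valid [PySem.List.pyGetD A ((k : Int) + 1 - 1) 0,
          PySem.List.pyGetD A ((k : Int) + 1) 0] = true) ↔
        (1 ≤ k ∧ valid [A.getD k 0, A.getD (k + 1) 0] = true) := by
      rw [hd1, hd2]
      constructor <;> rintro ⟨h1, h2⟩ <;> exact ⟨by omega, h2⟩
    have hc3 : ((k : Int) + 1 > 2 ∧ valid [PySem.List.pyGetD A ((k : Int) + 1 - 2) 0,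
          PySem.List.pyGetD A ((k : Int) + 1 - 1) 0,
          PySem.List.pyGetD A ((k : Int) + 1) 0] = true) ↔
        (2 ≤ k ∧ valid [A.getD (k - 1) 0, A.getD k 0, A.getD (k + 1) 0] = true) := by
      by_cases h1k : 1 ≤ k
      · have hd3 : PySem.List.pyGetD A ((k : Int) + 1 - 2) 0 = A.getD (k - 1) 0 := by
          rw [show ((k : Int) + 1 - 2) = ((k - 1 : Nat) : Int) by push_cast [h1k]; ring,
            PySem.List.pyGetD_natCast]
        rw [hd1, hd2, hd3]
        constructor <;> rintro ⟨h1, h2⟩ <;> exact ⟨by omega, h2⟩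
      · constructor <;> rintro ⟨h1, _⟩ <;> omega
    have hbt0 : M0.getD (k + 1) 0 = capOpt N none := by
      rw [ihent (k + 1) (by omega), if_neg (by omega)]; rfl
    constructor
    · show (solveStep A M0 ((k : Int) + 1)).length = _
      simp only [solveStep]
      split_ifs <;> simp [ihlen]
    · intro i hi
      show (solveStep A M0 ((k : Int) + 1)).getD i 0 = _
      simp only [solveStep]
      rw [show ((k : Int) + 1).toNat = k + 1 by omega,
        show ((k : Int) + 1 - 1).toNat = k by omega,
        show ((k : Int) + 1 - 2).toNat = k - 1 by omega,
        show ((k : Int) + 1 - 3).toNat = k - 2 by omega]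
      by_cases hit : i = k + 1
      · subst hit
        -- stage 1
        rw [ihent k (by omega), if_pos (le_refl k)]
        obtain ⟨len1, ent1, oth1⟩ := stage N M0 (k + 1) ht none (fB A k)
          (valid [PySem.List.pyGetD A ((k : Int) + 1) 0] = true)
          (valid [A.getD (k + 1) 0] = true) inferInstance inferInstance hc1 hbt0
        -- stage 2
        rw [oth1 (k - 1) (by omega), ihent (k - 1) (by omega), if_pos (show k - 1 ≤ k by omega)]
        obtain ⟨len2, ent2, oth2⟩ := stage N _ (k + 1) (by rw [len1]; exact ht) _ (fB A (k - 1))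
          ((k : Int) + 1 > 1 ∧ valid [PySem.List.pyGetD A ((k : Int) + 1 - 1) 0,
            PySem.List.pyGetD A ((k : Int) + 1) 0] = true)
          (1 ≤ k ∧ valid [A.getD k 0, A.getD (k + 1) 0] = true)
          inferInstance inferInstance hc2 ent1
        -- stage 3
        rw [oth2 (k - 2) (by omega), oth1 (k - 2) (by omega), ihent (k - 2) (by omega),
          if_pos (show k - 2 ≤ k by omega)]
        obtain ⟨len3, ent3, oth3⟩ := stage N _ (k + 1) (by rw [len2, len1]; exact ht) _
          (fB A (k - 2))
          ((k : Int) + 1 > 2 ∧ valid [PySem.List.pyGetD A ((k : Int) + 1 - 2) 0,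
            PySem.List.pyGetD A ((k : Int) + 1 - 1) 0,
            PySem.List.pyGetD A ((k : Int) + 1) 0] = true)
          (2 ≤ k ∧ valid [A.getD (k - 1) 0, A.getD k 0, A.getD (k + 1) 0] = true)
          inferInstance inferInstance hc3 ent2
        rw [ent3, if_pos (le_refl (k + 1)), fB]
      · split_ifs <;> (repeat rw [getD_set_ne' _ _ _ _ hit]) <;> rw [ihent i hi] <;>
          split_ifs <;> first | rfl | omega

-- ===== VERDICT (by name: the statement is the Claim_ definition above) =====
theorem solve_spec : Claim_equal_solve := by
  intro N A _ hPre
  obtain ⟨hN, _⟩ := hPre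
  unfold Spec_solve solve solve_alt
  have hcast : ((N.toNat : Int)) = N := Int.toNat_of_nonneg hN
  obtain ⟨hlen, hent⟩ := memo_inv N A hN N.toNat (by omega)
  rw [hcast] at hent
  have hi : N.toNat < (N + 1).toNat := by omega
  have := hent N.toNat hi
  rw [if_pos (le_refl _)] at this
  rw [this]
  cases hf : fB A N.toNat with
  | none => simp [capOpt]
  | some v =>
    have hv := fB_le A N.toNat v hf
    rw [hcast] at hv
    simp only [capOpt]
    omega
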